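-- pv_equiv track=rewrite | github.com/Eltrick/Tomfooleries | Eltrick/_SlightGibberishTwist/main.py | bitwise
-- ===== SOURCE A (Python) =====
-- def bitwise(a: list, b: list, op: str) -> list:
--     res = []
--     for i in range(len(a)):
--         res.append(False)
--
--     for i in range(len(a)):
--         if op == "AND":
--             res[i] = a[i] & b[i]
--         elif op == "NAND":
--             res[i] = not (a[i] & b[i])
--         elif op == "OR":
--             res[i] = a[i] | b[i]
--         elif op == "NOR":
--             res[i] = not (a[i] | b[i])
--         elif op == "IMP":
--             res[i] = (not a[i]) | b[i]
--         elif op == "NIMP":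
--             res[i] = not ((not a[i]) | b[i])
--         elif op == "IMPBY":
--             res[i] = a[i] | (not b[i])
--         elif op == "NIMPBY":
--             res[i] = not (a[i] | (not b[i]))
--         elif op == "XOR":
--             res[i] = a[i] ^ b[i]
--         elif op == "XNOR":
--             res[i] = not (a[i] ^ b[i])
--
--     return res
-- ===== SOURCE B (Python) =====
-- # Each op is a 4-bit truth table: bit (2*x + y) of the mask is f(x, y).
-- _MASK = {"AND": 0b1000, "NAND": 0b0111, "OR": 0b1110, "NOR": 0b0001,
--          "IMP": 0b1011, "NIMP": 0b0100, "IMPBY": 0b1101, "NIMPBY": 0b0010,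
--          "XOR": 0b0110, "XNOR": 0b1001}
--
-- def bitwise(a: list, b: list, op: str) -> list:
--     m = _MASK.get(op, 0)
--     if m == 0:
--         return [False] * len(a)
--     return [bool((m >> (2 * x + y)) & 1) for x, y in zip(a, b)]
-- ===== Notes on version B (the rewrite author's own statement) =====
-- stated objective: faster
-- what changed: Replaces the pre-fill loop plus per-element if/elif chain of ten boolean expressions with a 4-bit truth-table mask per op, looked up once, and a single uniform bit-extraction ((m >> (2*x+y)) & 1) over zip(a,b); unknown ops map to mask 0 and return [False]*len(a) without touching b.
import Mathlib
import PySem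

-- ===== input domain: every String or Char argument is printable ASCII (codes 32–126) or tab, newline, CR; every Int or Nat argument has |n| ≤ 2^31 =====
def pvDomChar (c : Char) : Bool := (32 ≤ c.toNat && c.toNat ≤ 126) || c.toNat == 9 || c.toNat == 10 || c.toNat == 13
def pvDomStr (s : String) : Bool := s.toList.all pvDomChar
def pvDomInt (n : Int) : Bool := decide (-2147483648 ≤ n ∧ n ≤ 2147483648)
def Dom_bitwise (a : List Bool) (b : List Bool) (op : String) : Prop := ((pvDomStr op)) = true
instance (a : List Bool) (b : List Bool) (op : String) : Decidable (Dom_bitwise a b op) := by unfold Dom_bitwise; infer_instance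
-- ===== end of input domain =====

-- B replaces the per-element if/elif chain with a 4-bit truth-table mask per op and one uniform bit extraction (alternative representation).

-- ===== PORT A =====
-- literal transliteration: pre-fill loop appending False, then an index loop with the if/elif chain
def bitwise (a : List Bool) (b : List Bool) (op : String) : List Bool :=
  let res := (List.range a.length).foldl (fun r _ => r ++ [false]) []
  (List.range a.length).foldl (fun r (i : Nat) =>
    let x := PySem.List.pyGetD a (i : Int) false
    let y := PySem.List.pyGetD b (i : Int) false
    if op = "AND" then r.set i (x && y)
    else if op = "NAND" then r.set i (!(x && y))
    else if op = "OR" then r.set i (x || y)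
    else if op = "NOR" then r.set i (!(x || y))
    else if op = "IMP" then r.set i ((!x) || y)
    else if op = "NIMP" then r.set i (!((!x) || y))
    else if op = "IMPBY" then r.set i (x || (!y))
    else if op = "NIMPBY" then r.set i (!(x || (!y)))
    else if op = "XOR" then r.set i (xor x y)
    else if op = "XNOR" then r.set i (!(xor x y))
    else r) res

-- ===== PORT B =====
-- the truth-table masks of Source B: bit (2*x + y) of the mask is f(x, y)
def maskTable : List (String × Nat) :=
  [("AND", 8), ("NAND", 7), ("OR", 14), ("NOR", 1),
   ("IMP", 11), ("NIMP", 4), ("IMPBY", 13), ("NIMPBY", 2),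
   ("XOR", 6), ("XNOR", 9)]

def maskBit (m : Nat) (x y : Bool) : Bool :=
  ((m >>> (2 * (if x then 1 else 0) + (if y then 1 else 0))) &&& 1) == 1

def bitwise_alt (a : List Bool) (b : List Bool) (op : String) : List Bool :=
  let m := (maskTable.lookup op).getD 0
  if m = 0 then List.replicate a.length false
  else (a.zip b).map (fun p => maskBit m p.1 p.2)

-- ===== PRECONDITION & SPEC =====
-- Pre_ excludes exactly the inputs where A raises IndexError: a recognised op with b shorter than a.
def Pre_bitwise (a : List Bool) (b : List Bool) (op : String) : Prop :=
  op ∈ ["AND", "NAND", "OR", "NOR", "IMP", "NIMP", "IMPBY", "NIMPBY", "XOR", "XNOR"] →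
    a.length ≤ b.length
instance (a : List Bool) (b : List Bool) (op : String) : Decidable (Pre_bitwise a b op) := by
  unfold Pre_bitwise; infer_instance

def pvWitness_bitwise : List Bool × List Bool × String := ([true, false], [false, false], "NAND")

def Spec_bitwise (a : List Bool) (b : List Bool) (op : String) (out : List Bool) : Prop := out = bitwise_alt a b op
instance (a : List Bool) (b : List Bool) (op : String) (out : List Bool) : Decidable (Spec_bitwise a b op out) := by unfold Spec_bitwise; infer_instance

-- ===== CLAIM =====
def Claim_equal_bitwise : Prop := ∀ (a : List Bool) (b : List Bool) (op : String), Dom_bitwise a b op → Pre_bitwise a b op → Spec_bitwise a b op (bitwise a b op)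

-- ===== LEMMAS AND PROOFS =====

-- the pre-fill loop builds replicate false
lemma prefill_eq (n : Nat) :
    (List.range n).foldl (fun r _ => r ++ [false]) ([] : List Bool) = List.replicate n false := by
  rw [PySem.List.foldl_append_singleton_eq_map]
  simp [List.map_const']

-- the set loop writes f i at each index i < n
lemma fold_set_range (f : Nat → Bool) :
    ∀ (n : Nat) (res : List Bool), n ≤ res.length →
      (List.range n).foldl (fun r i => r.set i (f i)) res
        = (List.range n).map f ++ res.drop n := by
  intro n
  induction n with
  | zero => simp
  | succ n ih =>
    intro res h
    rw [List.range_succ, List.foldl_append]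
    rw [ih res (by omega)]
    have hlen : ((List.range n).map f).length = n := by simp
    have hdrop : res.drop n = res[n] :: res.drop (n + 1) :=
      (List.getElem_cons_drop (by omega)).symm
    simp only [List.foldl_cons, List.foldl_nil]
    rw [List.set_append_right _ _ (by omega), hlen, Nat.sub_self, hdrop]
    rw [List.set_cons_zero]
    simp [List.range_succ]

-- A's index loop with per-element op fA equals B's zip-map with g, when fA = g pointwise
lemma branch_eq (a b : List Bool) (fA g : Bool → Bool → Bool) (hb : a.length ≤ b.length)
    (hfg : ∀ x y, fA x y = g x y) :
    (List.range a.length).foldl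
        (fun r i => r.set i (fA (PySem.List.pyGetD a (i : Int) false) (PySem.List.pyGetD b (i : Int) false)))
        (List.replicate a.length false)
      = (a.zip b).map (fun p => g p.1 p.2) := by
  rw [fold_set_range (fun i => fA (PySem.List.pyGetD a (i : Int) false) (PySem.List.pyGetD b (i : Int) false))
        a.length (List.replicate a.length false) (by simp)]
  apply List.ext_getElem
  · simp; omega
  · intro i h1 h2
    have hia : i < a.length := by simpa using h1
    have hib : i < b.length := by omega
    simp [PySem.List.pyGetD_natCast, List.getD_eq_getElem, hia, hib, hfg]

-- ===== VERDICT =====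
theorem bitwise_spec : Claim_equal_bitwise := by
  intro a b op _ hpre
  unfold Spec_bitwise bitwise bitwise_alt
  by_cases h1 : op = "AND"
  · subst h1
    simp only [prefill_eq, maskTable, List.lookup, BEq.rfl, String.reduceEq, reduceIte,
      Option.getD_some, show (8 : Nat) ≠ 0 by decide, if_true, if_false]
    exact branch_eq a b (fun x y => x && y) (maskBit 8) (hpre (by simp)) (by decide)
  by_cases h2 : op = "NAND"
  · subst h2
    simp only [prefill_eq, maskTable, List.lookup, BEq.rfl, String.reduceEq, reduceIte,
      Option.getD_some, show (7 : Nat) ≠ 0 by decide, if_true, if_false]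
    exact branch_eq a b (fun x y => !(x && y)) (maskBit 7) (hpre (by simp)) (by decide)
  by_cases h3 : op = "OR"
  · subst h3
    simp only [prefill_eq, maskTable, List.lookup, BEq.rfl, String.reduceEq, reduceIte,
      Option.getD_some, show (14 : Nat) ≠ 0 by decide, if_true, if_false]
    exact branch_eq a b (fun x y => x || y) (maskBit 14) (hpre (by simp)) (by decide)
  by_cases h4 : op = "NOR"
  · subst h4
    simp only [prefill_eq, maskTable, List.lookup, BEq.rfl, String.reduceEq, reduceIte,
      Option.getD_some, show (1 : Nat) ≠ 0 by decide, if_true, if_false]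
    exact branch_eq a b (fun x y => !(x || y)) (maskBit 1) (hpre (by simp)) (by decide)
  by_cases h5 : op = "IMP"
  · subst h5
    simp only [prefill_eq, maskTable, List.lookup, BEq.rfl, String.reduceEq, reduceIte,
      Option.getD_some, show (11 : Nat) ≠ 0 by decide, if_true, if_false]
    exact branch_eq a b (fun x y => (!x) || y) (maskBit 11) (hpre (by simp)) (by decide)
  by_cases h6 : op = "NIMP"
  · subst h6
    simp only [prefill_eq, maskTable, List.lookup, BEq.rfl, String.reduceEq, reduceIte,
      Option.getD_some, show (4 : Nat) ≠ 0 by decide, if_true, if_false]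
    exact branch_eq a b (fun x y => !((!x) || y)) (maskBit 4) (hpre (by simp)) (by decide)
  by_cases h7 : op = "IMPBY"
  · subst h7
    simp only [prefill_eq, maskTable, List.lookup, BEq.rfl, String.reduceEq, reduceIte,
      Option.getD_some, show (13 : Nat) ≠ 0 by decide, if_true, if_false]
    exact branch_eq a b (fun x y => x || (!y)) (maskBit 13) (hpre (by simp)) (by decide)
  by_cases h8 : op = "NIMPBY"
  · subst h8
    simp only [prefill_eq, maskTable, List.lookup, BEq.rfl, String.reduceEq, reduceIte,
      Option.getD_some, show (2 : Nat) ≠ 0 by decide, if_true, if_false]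
    exact branch_eq a b (fun x y => !(x || (!y))) (maskBit 2) (hpre (by simp)) (by decide)
  by_cases h9 : op = "XOR"
  · subst h9
    simp only [prefill_eq, maskTable, List.lookup, BEq.rfl, String.reduceEq, reduceIte,
      Option.getD_some, show (6 : Nat) ≠ 0 by decide, if_true, if_false]
    exact branch_eq a b (fun x y => xor x y) (maskBit 6) (hpre (by simp)) (by decide)
  by_cases h10 : op = "XNOR"
  · subst h10
    simp only [prefill_eq, maskTable, List.lookup, BEq.rfl, String.reduceEq, reduceIte,
      Option.getD_some, show (9 : Nat) ≠ 0 by decide, if_true, if_false]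
    exact branch_eq a b (fun x y => !(xor x y)) (maskBit 9) (hpre (by simp)) (by decide)
  simp only [if_neg h1, if_neg h2, if_neg h3, if_neg h4, if_neg h5, if_neg h6, if_neg h7,
    if_neg h8, if_neg h9, if_neg h10]
  have e1 : (op == "AND") = false := beq_eq_false_iff_ne.mpr h1
  have e2 : (op == "NAND") = false := beq_eq_false_iff_ne.mpr h2
  have e3 : (op == "OR") = false := beq_eq_false_iff_ne.mpr h3
  have e4 : (op == "NOR") = false := beq_eq_false_iff_ne.mpr h4
  have e5 : (op == "IMP") = false := beq_eq_false_iff_ne.mpr h5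
  have e6 : (op == "NIMP") = false := beq_eq_false_iff_ne.mpr h6
  have e7 : (op == "IMPBY") = false := beq_eq_false_iff_ne.mpr h7
  have e8 : (op == "NIMPBY") = false := beq_eq_false_iff_ne.mpr h8
  have e9 : (op == "XOR") = false := beq_eq_false_iff_ne.mpr h9
  have e10 : (op == "XNOR") = false := beq_eq_false_iff_ne.mpr h10
  have hlk : maskTable.lookup op = none := by
    simp [maskTable, List.lookup, e1, e2, e3, e4, e5, e6, e7, e8, e9, e10]
  rw [hlk]
  simp only [Option.getD_none, if_pos rfl]
  rw [List.foldl_fixed]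
  exact prefill_eq a.length
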